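-- pv_equiv track=rewrite | github.com/audreyandoy/candy_exercise | candy_problem/main.py | create_new_candy_data_structure
-- ===== SOURCE A (Python) =====
-- def create_new_candy_data_structure(data):
--     candy_list = set()
--
--     for friend in data:
--         for candy in friend[1]:
--             candy_list.add(candy)
--
--     new_data = {}
--
--     for candy in candy_list:
--         new_data[candy] = []
--
--     for friend in data:
--         friend_name = friend[0]
--         candy_list = friend[1]
--         for candy in candy_list:
--             new_data[candy].append(friend_name)
--
--     return new_data
-- ===== SOURCE B (Python) =====
-- def create_new_candy_data_structure(data):
--     # Collect the distinct candies, then for each candy scan all of data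
--     # gathering the names of friends that have it (once per occurrence).
--     candy_set = set()
--     for friend in data:
--         for candy in friend[1]:
--             candy_set.add(candy)
--     return {candy: [friend[0] for friend in data for c in friend[1] if c == candy]
--             for candy in candy_set}
-- ===== Notes on version B (the rewrite author's own statement) =====
-- stated objective: alternative
-- what changed: A inverts the mapping in one append pass into pre-initialised per-candy lists; B never appends into a growing dict: it builds the result as a dict comprehension that, for each candy of the set, rescans data and collects the matching friend names.
import Mathlib
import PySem

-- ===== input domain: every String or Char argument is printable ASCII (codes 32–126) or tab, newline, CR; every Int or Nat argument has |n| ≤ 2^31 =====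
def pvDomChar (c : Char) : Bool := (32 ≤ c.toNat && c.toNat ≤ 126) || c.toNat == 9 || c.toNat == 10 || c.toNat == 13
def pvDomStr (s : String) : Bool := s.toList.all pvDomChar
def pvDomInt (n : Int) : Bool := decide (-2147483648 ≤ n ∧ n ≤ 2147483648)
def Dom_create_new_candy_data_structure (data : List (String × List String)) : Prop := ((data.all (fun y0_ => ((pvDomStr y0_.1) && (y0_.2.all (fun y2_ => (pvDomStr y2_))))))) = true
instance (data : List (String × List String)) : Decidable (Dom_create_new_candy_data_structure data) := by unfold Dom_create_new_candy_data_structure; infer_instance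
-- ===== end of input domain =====

-- B replaces A's inversion pass (appending each name into pre-initialised per-candy lists of a
-- growing dict) by a dict comprehension that rescans all of data once per candy of the set.
-- Python's set hash order is not modelled; dict/set outputs are compared as maps.

-- ===== PORT A =====
def create_new_candy_data_structure (data : List (String × List String)) : List (String × List String) :=
  let candy_list : PySem.Set String :=
    data.foldl (fun s friend => friend.2.foldl (fun s c => PySem.Set.add s c) s) PySem.Set.empty
  let new_data : PySem.Dict String (List String) :=
    candy_list.foldl (fun d c => d.insert c []) PySem.Dict.empty
  let new_data2 :=
    data.foldl (fun d friend =>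
      friend.2.foldl (fun d c => d.modify c [] (fun l => l ++ [friend.1])) d) new_data
  new_data2.items

-- ===== PORT B =====
-- the dict comprehension over candy_set; the inner list comprehension
-- '[friend[0] for friend in data for c in friend[1] if c == candy]' is the flatMap below.
def create_new_candy_data_structure_alt (data : List (String × List String)) : List (String × List String) :=
  let candy_set : PySem.Set String :=
    data.foldl (fun s friend => friend.2.foldl (fun s c => PySem.Set.add s c) s) PySem.Set.empty
  candy_set.map (fun candy =>
    (candy, data.flatMap (fun friend => (friend.2.filter (fun c => c == candy)).map (fun _ => friend.1))))

-- ===== PRECONDITION & SPEC =====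
def Spec_create_new_candy_data_structure (data : List (String × List String)) (out : List (String × List String)) : Prop := out = create_new_candy_data_structure_alt data
instance (data : List (String × List String)) (out : List (String × List String)) : Decidable (Spec_create_new_candy_data_structure data out) := by unfold Spec_create_new_candy_data_structure; infer_instance

-- ===== CLAIM (what is proved, stated in full; the proofs are below) =====
def Claim_equal_create_new_candy_data_structure : Prop := ∀ (data : List (String × List String)), Dom_create_new_candy_data_structure data → Spec_create_new_candy_data_structure data (create_new_candy_data_structure data)

-- ===== LEMMAS AND PROOFS =====

-- A's candy set is the ordered dedup of all candies.
theorem candy_set_eq (data : List (String × List String)) :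
    data.foldl (fun s friend => friend.2.foldl (fun s c => PySem.Set.add s c) s) PySem.Set.empty
      = PySem.Set.ofList (data.flatMap (·.2)) := by
  rw [PySem.Set.ofList_eq_foldl, List.foldl_flatMap]
  rfl

-- Set.update by elements already present leaves the set unchanged.
theorem set_update_subset (s : PySem.Set String) (l : List String)
    (h : ∀ x ∈ l, x ∈ s) : PySem.Set.update s l = s := by
  induction l generalizing s with
  | nil => rfl
  | cons x l ih =>
      have hx : x ∈ s := h x (List.mem_cons_self ..)
      have hadd : PySem.Set.add s x = s := by simp [PySem.Set.add, PySem.Set.contains, hx]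
      simp only [PySem.Set.update, List.foldl_cons] at *
      rw [hadd]
      exact ih s (fun y hy => h y (List.mem_cons_of_mem _ hy))

-- A dict with nodup keys is the map of getD over its keys.
theorem items_eq_map_keys (d : PySem.Dict String (List String)) (hnd : d.keys.Nodup) :
    d.items = d.keys.map (fun k => (k, d.getD k [])) := by
  have h1 : d.keys.map (fun k => (k, d.getD k [])) = d.items.map (fun p => (p.1, d.getD p.1 [])) := by
    simp only [PySem.Dict.keys, List.map_map, Function.comp_def]
  rw [h1]
  have h2 : ∀ p ∈ d.items, (p.1, d.getD p.1 ([] : List String)) = p := by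
    intro p hp
    have := PySem.Dict.getD_of_mem_items (d := d) (k := p.1) (v := p.2) (d0 := [])
      (by simpa using hp) hnd
    simp [this]
  exact ((List.map_congr_left h2).trans (List.map_id _)).symm

-- The nested grouping pass flattened to a single fold over (candy, name) pairs.
theorem append_pass_eq (data : List (String × List String)) (d : PySem.Dict String (List String)) :
    data.foldl (fun d friend =>
        friend.2.foldl (fun d c => d.modify c [] (fun l => l ++ [friend.1])) d) d
      = (data.flatMap (fun f => f.2.map (fun c => (c, f.1)))).foldl
          (fun d p => d.modify p.1 [] (fun l => l ++ [p.2])) d := by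
  rw [List.foldl_flatMap]
  congr 1
  funext d f
  rw [List.foldl_map]

-- The candy components of the flattened pairs are all the candies, in order.
theorem pairs_fst_eq (data : List (String × List String)) :
    (data.flatMap (fun f => f.2.map (fun c => (c, f.1)))).map Prod.fst
      = data.flatMap (·.2) := by
  rw [List.map_flatMap]
  simp [List.map_map, Function.comp_def]

-- The names grouped under candy c by the fold equal B's per-candy scan of data.
theorem filter_pairs_eq_scan (data : List (String × List String)) (c : String) :
    ((data.flatMap (fun f => f.2.map (fun x => (x, f.1)))).filter (fun p => p.1 == c)).map (·.2)
      = data.flatMap (fun f => (f.2.filter (fun x => x == c)).map (fun _ => f.1)) := by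
  rw [List.filter_flatMap, List.map_flatMap]
  congr 1
  funext f
  rw [List.filter_map, List.map_map]
  rfl

-- ===== VERDICT (by name: the statement is the Claim_ definition above) =====
theorem create_new_candy_data_structure_spec : Claim_equal_create_new_candy_data_structure := by
  intro data _
  unfold Spec_create_new_candy_data_structure
  unfold create_new_candy_data_structure create_new_candy_data_structure_alt
  simp only []
  rw [candy_set_eq]
  set S : PySem.Set String := PySem.Set.ofList (data.flatMap (·.2)) with hS
  set pairs : List (String × String) := data.flatMap (fun f => f.2.map (fun c => (c, f.1))) with hpairs
  have hSnd : S.Nodup := PySem.Set.nodup_ofList _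
  have hfst : pairs.map Prod.fst = data.flatMap (·.2) := pairs_fst_eq data
  -- A's pre-initialised dict
  have hd0 : (S.foldl (fun d c => d.insert c ([] : List String)) PySem.Dict.empty).items
      = S.map (fun c => (c, ([] : List String))) := by
    have := PySem.Dict.items_foldl_insert_fresh (l := S) (k := fun c => c)
      (v := fun _ => ([] : List String)) (d := PySem.Dict.empty)
      (by intro a _; simp) (by simpa using hSnd)
    simpa using this
  set d0 := S.foldl (fun d c => d.insert c ([] : List String)) PySem.Dict.empty with hd0def
  have hd0keys : d0.keys = S := by
    simp [PySem.Dict.keys, hd0, List.map_map, Function.comp_def]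
  have hd0nd : d0.keys.Nodup := by rw [hd0keys]; exact hSnd
  rw [append_pass_eq]
  set d2 := pairs.foldl (fun d p => d.modify p.1 [] (fun l => l ++ [p.2])) d0 with hd2
  have hd2keys : d2.keys = S := by
    rw [hd2, PySem.Dict.keys_foldl_modify_key, hd0keys]
    apply set_update_subset
    intro x hx
    rw [hS, PySem.Set.mem_ofList, ← hfst]
    exact hx
  have hd2nd : d2.keys.Nodup := by rw [hd2keys]; exact hSnd
  rw [items_eq_map_keys d2 hd2nd, hd2keys]
  apply List.map_congr_left
  intro c hc
  have hvd : d2.getD c [] = d0.getD c [] ++ (pairs.filter (fun p => p.1 == c)).map (·.2) := by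
    rw [hd2, PySem.Dict.getD_foldl_modify_append]
  have hz : d0.getD c [] = [] :=
    PySem.Dict.getD_of_mem_items (d := d0) (k := c) (v := ([] : List String)) (d0 := [])
      (by rw [hd0]; exact List.mem_map_of_mem hc) hd0nd
  rw [hvd, hz, List.nil_append, hpairs, filter_pairs_eq_scan]
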